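-- pv_equiv track=rewrite | github.com/981377660LMT/algorithm-study | 17_模式匹配/3088. 使字符串反回文.py | makeAntiPalindrome
-- ===== SOURCE A (Python) =====
-- def makeAntiPalindrome(s: str) -> str:
--     n = len(s)
--     sb = sorted(s)
--     m = n >> 1
--     if sb[m] != sb[m - 1]:
--         return "".join(sb)
--
--     ptr = m
--     while ptr < n and sb[ptr] == sb[m - 1]:
--         ptr += 1
--
--     # ![m,ptr) 前缀中的一些字符需要从后面[ptr,n) 交换过来
--     for i in range(m, n):
--         if sb[i] != sb[~i]:
--             break
--         if ptr >= n:
--             return "-1"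
--         sb[i], sb[ptr] = sb[ptr], sb[i]
--         ptr += 1
--
--     return "".join(sb)
-- ===== SOURCE B (Python) =====
-- def makeAntiPalindrome(s: str) -> str:
--     n = len(s)
--     counts = {}
--     for ch in s:
--         counts[ch] = counts.get(ch, 0) + 1
--     t = "".join(ch * counts[ch] for ch in sorted(counts))
--     m = n >> 1
--     c = t[m - 1]
--     if t[m] != c:
--         return t
--     cnt = counts[c]
--     if cnt > m:
--         return "-1"
--     lo = t.index(c)
--     ptr = lo + cnt
--     k = n - lo - m
--     return t[:m] + t[ptr:ptr + k] + c * (ptr - m) + t[ptr + k:]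
-- ===== Notes on version B (the rewrite author's own statement) =====
-- stated objective: alternative
-- what changed: B replaces A's comparison sort + in-place swap loop by counting characters once, rebuilding the sorted string from the counts, and producing the answer directly as a closed-form slice expression (prefix + shifted block + c-run + suffix) with the -1 case decided by the single test count(c) > n//2.
import Mathlib
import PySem

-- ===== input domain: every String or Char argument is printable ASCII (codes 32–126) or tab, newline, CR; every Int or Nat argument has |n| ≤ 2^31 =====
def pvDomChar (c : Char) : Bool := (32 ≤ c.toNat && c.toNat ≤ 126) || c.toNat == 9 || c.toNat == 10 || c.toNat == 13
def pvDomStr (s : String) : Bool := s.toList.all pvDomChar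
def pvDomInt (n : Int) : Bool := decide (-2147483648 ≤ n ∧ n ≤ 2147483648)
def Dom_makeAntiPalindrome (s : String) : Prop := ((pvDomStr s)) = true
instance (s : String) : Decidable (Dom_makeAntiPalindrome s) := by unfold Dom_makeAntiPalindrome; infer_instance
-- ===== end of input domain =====

-- B replaces A's comparison sort and in-place swap loop by a count-and-rebuild of the
-- sorted string plus a closed-form slice construction of the answer (objective: alternative).

-- ===== PORT A =====
-- while ptr < n and sb[ptr] == c: ptr += 1
def pvWhileA (sb : List Char) (c : Char) (n ptr : Nat) : Nat :=
  if ptr < n ∧ PySem.List.pyGet? sb (ptr : Int) = some c then pvWhileA sb c n (ptr + 1)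
  else ptr
termination_by n - ptr
decreasing_by omega

-- sb[i], sb[ptr] = sb[ptr], sb[i]
def pvSwapA (sb : List Char) (i p : Nat) : List Char :=
  match sb[i]?, sb[p]? with
  | some a, some b => (sb.set i b).set p a
  | _, _ => sb

-- for i in range(m, n): if sb[i] != sb[~i]: break; if ptr >= n: return "-1"; swap; ptr += 1
def pvForA (sb : List Char) (n i ptr : Nat) : String :=
  if _h : i < n then
    if PySem.List.pyGet? sb (i : Int) ≠ PySem.List.pyGet? sb (Int.negSucc i) then String.ofList sb
    else if ptr ≥ n then "-1"
    else pvForA (pvSwapA sb i ptr) n (i + 1) (ptr + 1)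
  else String.ofList sb
termination_by n - i
decreasing_by omega

def makeAntiPalindrome (s : String) : String :=
  let l := s.toList
  let n := l.length
  let sb := PySem.List.sorted l (fun c => c) false
  let m := n >>> 1
  match PySem.List.pyGet? sb (m : Int), PySem.List.pyGet? sb ((m : Int) - 1) with
  | some a, some b =>
      if a ≠ b then String.ofList sb
      else pvForA sb n m (pvWhileA sb b n m)
  | _, _ => ""   -- empty string: Python raises IndexError here (outside Pre_)

-- ===== PORT B =====
def makeAntiPalindrome_alt (s : String) : String :=
  let l := s.toList
  let n := l.length
  let counts := l.foldl (fun d ch => d.insert ch (d.getD ch 0 + 1)) (PySem.Dict.empty : PySem.Dict Char Int)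
  let t := (PySem.List.sorted counts.keys (fun c => c) false).flatMap
             (fun ch => List.replicate (counts.getD ch 0).toNat ch)
  let m := n >>> 1
  match PySem.List.pyGet? t ((m : Int) - 1) with
  | none => ""   -- empty string: Python raises IndexError here (outside Pre_)
  | some c =>
    if PySem.List.pyGet? t (m : Int) ≠ some c then String.ofList t
    else
      let cnt := (counts.getD c 0).toNat
      if cnt > m then "-1"
      else
        match PySem.List.index? t c with
        | none => ""   -- unreachable: c ∈ t, t.index(c) cannot raise
        | some lo =>
          let ptr := lo + cnt
          let k := n - lo - m
          String.ofList (PySem.List.slice t none (some (m : Int)) ++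
                     PySem.List.slice t (some (ptr : Int)) (some ((ptr + k : Nat) : Int)) ++
                     List.replicate (ptr - m) c ++
                     PySem.List.slice t (some ((ptr + k : Nat) : Int)) none)

-- ===== PRECONDITION & SPEC =====
-- Pre_ excludes only the empty string, on which Python A raises IndexError (sb[0] of []).
def Pre_makeAntiPalindrome (s : String) : Prop := s ≠ ""
instance (s : String) : Decidable (Pre_makeAntiPalindrome s) := by unfold Pre_makeAntiPalindrome; infer_instance
def pvWitness_makeAntiPalindrome : String := "abab"

def Spec_makeAntiPalindrome (s : String) (out : String) : Prop := out = makeAntiPalindrome_alt s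
instance (s : String) (out : String) : Decidable (Spec_makeAntiPalindrome s out) := by unfold Spec_makeAntiPalindrome; infer_instance

-- ===== CLAIM (what is proved, stated in full; the proofs are below) =====
def Claim_equal_makeAntiPalindrome : Prop := ∀ (s : String), Dom_makeAntiPalindrome s → Pre_makeAntiPalindrome s → Spec_makeAntiPalindrome s (makeAntiPalindrome s)

-- ===== LEMMAS AND PROOFS =====


-- getElem? through a right-nested three-segment append
lemma pv_get3 (P S : List Char) (c : Char) (cnt i : Nat) :
    (P ++ (List.replicate cnt c ++ S))[i]? =
      if i < P.length then P[i]?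
      else if i < P.length + cnt then some c
      else S[i - P.length - cnt]? := by
  by_cases h1 : i < P.length
  · rw [List.getElem?_append_left h1, if_pos h1]
  · rw [List.getElem?_append_right (by omega), if_neg h1]
    by_cases h2 : i < P.length + cnt
    · rw [List.getElem?_append_left (by simp; omega), if_pos h2, List.getElem?_replicate,
        if_pos (by omega)]
    · rw [List.getElem?_append_right (by simp; omega), if_neg h2]
      simp only [List.length_replicate]

-- getElem? through the five-segment loop state
lemma pv_getV (P S : List Char) (c : Char) (r q j i : Nat) (hj : j ≤ S.length) :
    (P ++ (List.replicate r c ++ (S.take j ++ (List.replicate q c ++ S.drop j))))[i]? =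
      if i < P.length then P[i]?
      else if i < P.length + r then some c
      else if i < P.length + r + j then S[i - P.length - r]?
      else if i < P.length + r + j + q then some c
      else S[i - P.length - r - q]? := by
  by_cases h1 : i < P.length
  · rw [List.getElem?_append_left h1, if_pos h1]
  · rw [List.getElem?_append_right (by omega), if_neg h1]
    by_cases h2 : i < P.length + r
    · rw [List.getElem?_append_left (by simp; omega), if_pos h2, List.getElem?_replicate,
        if_pos (by omega)]
    · rw [List.getElem?_append_right (by simp; omega), if_neg h2]
      by_cases h3 : i < P.length + r + j
      · rw [List.getElem?_append_left (by simp; omega), if_pos h3]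
        rw [List.getElem?_take]
        simp only [List.length_replicate]
        rw [if_pos (by omega)]
      · rw [List.getElem?_append_right (by simp; omega), if_neg h3]
        by_cases h4 : i < P.length + r + j + q
        · rw [List.getElem?_append_left (by simp; omega), if_pos h4, List.getElem?_replicate,
            if_pos (by simp; omega)]
        · rw [List.getElem?_append_right (by simp; omega), if_neg h4]
          rw [List.getElem?_drop]
          simp only [List.length_replicate, List.length_take]
          congr 1
          omega

lemma pv_count_flatMap (L : List Char) (f : Char → Nat) (a : Char) (hN : L.Nodup) :
    (L.flatMap fun ch => List.replicate (f ch) ch).count a = if a ∈ L then f a else 0 := by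
  induction L with
  | nil => simp
  | cons x L ih =>
    rw [List.nodup_cons] at hN
    rw [List.flatMap_cons, List.count_append, ih hN.2, List.count_replicate]
    by_cases hx : a = x
    · subst hx
      rw [if_neg hN.1, if_pos List.mem_cons_self, if_pos (by simp)]
      omega
    · rw [if_neg (by simpa using fun h => hx h.symm)]
      by_cases ha : a ∈ L
      · rw [if_pos ha, if_pos (List.mem_cons_of_mem _ ha)]
        omega
      · rw [if_neg ha, if_neg (by simp [hx, ha])]

lemma pv_pairwise_flatMap (L : List Char) (f : Char → Nat) (h : L.Pairwise (· < ·)) :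
    (L.flatMap fun ch => List.replicate (f ch) ch).Pairwise (· ≤ ·) := by
  induction L with
  | nil => simp
  | cons x L ih =>
    rw [List.flatMap_cons, List.pairwise_append]
    refine ⟨?_, ih (List.Pairwise.of_cons h), ?_⟩
    · rw [List.pairwise_replicate]
      right; exact le_refl x
    · intro a ha b hb
      obtain ⟨y, hy, hb'⟩ := List.mem_flatMap.1 hb
      rw [List.eq_of_mem_replicate ha, List.eq_of_mem_replicate hb']
      exact le_of_lt (List.rel_of_pairwise_cons h hy)

-- the count-and-rebuild string is exactly sorted(s)
lemma pv_t_eq_sorted (l : List Char) :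
    ((PySem.List.sorted (PySem.Set.ofList l) (fun c => c) false).flatMap
      fun ch => List.replicate (l.count ch) ch) = PySem.List.sorted l (fun c => c) false := by
  have hpl := PySem.List.sorted_ofList_pairwise_lt (κ := Char) l
  have hN : (PySem.List.sorted (PySem.Set.ofList l) (fun c => c) false).Nodup :=
    hpl.imp fun h => ne_of_lt h
  have hmem : ∀ a : Char, a ∈ PySem.List.sorted (PySem.Set.ofList l) (fun c => c) false ↔ a ∈ l :=
    fun a => (PySem.List.mem_sorted _ _ _ _).trans (PySem.Set.mem_ofList _ _)
  refine (PySem.List.sorted_id_eq_of_perm_of_pairwise l _ ?_ ?_).symm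
  · rw [List.perm_iff_count]
    intro a
    rw [pv_count_flatMap _ _ _ hN]
    by_cases ha : a ∈ l
    · rw [if_pos ((hmem a).2 ha)]
    · rw [if_neg (fun h => ha ((hmem a).1 h)), List.count_eq_zero.2 ha]
  · exact pv_pairwise_flatMap _ _ hpl

-- sorted(l) splits as (elements < c) ++ c-block ++ (elements > c)
lemma pv_decomp (l : List Char) (c : Char) :
    PySem.List.sorted l (fun x => x) false =
      ((PySem.List.sorted l (fun x => x) false).filter fun x => decide (x < c)) ++
      (List.replicate (l.count c) c ++
       ((PySem.List.sorted l (fun x => x) false).filter fun x => decide (c < x))) := by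
  have hsc : ∀ b : Char, (PySem.List.sorted l (fun x => x) false).count b = l.count b :=
    fun b => (PySem.List.sorted_perm l _ false).count_eq b
  have hzero : ∀ (p : Char → Bool) (a : Char), p a = false →
      ((PySem.List.sorted l (fun x => x) false).filter p).count a = 0 := by
    intro p a hpa
    refine List.count_eq_zero.2 fun hm => ?_
    have := (List.mem_filter.1 hm).2
    rw [hpa] at this
    cases this
  apply PySem.List.sorted_id_eq_of_perm_of_pairwise
  · rw [List.perm_iff_count]
    intro a
    rw [List.count_append, List.count_append, List.count_replicate]
    rcases lt_trichotomy a c with h | h | h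
    · rw [List.count_filter (by simpa using h), hsc,
        if_neg (by simpa using ne_of_gt h), hzero _ _ (by simpa using not_lt_of_gt h)]
      omega
    · subst h
      rw [hzero _ _ (by simp), hzero _ _ (by simp), if_pos (by simp)]
      omega
    · rw [hzero _ _ (by simpa using not_lt_of_gt h), List.count_filter (by simpa using h), hsc,
        if_neg (by simpa using ne_of_lt h)]
      omega
  · have hpw := PySem.List.sorted_pairwise l (fun x : Char => x)
    rw [List.pairwise_append, List.pairwise_append]
    refine ⟨hpw.filter _, ⟨?_, hpw.filter _, ?_⟩, ?_⟩
    · rw [List.pairwise_replicate]; right; exact le_refl c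
    · intro a ha b hb
      rw [List.eq_of_mem_replicate ha]
      exact le_of_lt (by simpa using (List.mem_filter.1 hb).2)
    · intro a ha b hb
      have ha' : a < c := by simpa using (List.mem_filter.1 ha).2
      rcases List.mem_append.1 hb with hb | hb
      · rw [List.eq_of_mem_replicate hb]; exact le_of_lt ha'
      · exact le_of_lt (lt_trans ha' (by simpa using (List.mem_filter.1 hb).2))

-- first index of c in the decomposition
lemma pv_index3 (P S : List Char) (c : Char) (cnt : Nat)
    (hP : ∀ x ∈ P, x ≠ c) (hc : 1 ≤ cnt) :
    PySem.List.index? (P ++ (List.replicate cnt c ++ S)) c = some P.length := by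
  induction P with
  | nil =>
    obtain ⟨cnt', rfl⟩ : ∃ cnt', cnt = cnt' + 1 := ⟨cnt - 1, by omega⟩
    simpa [List.replicate_succ] using PySem.List.index?_cons_self c _
  | cons x P ih =>
    rw [List.cons_append, PySem.List.index?_cons_of_ne _ (hP x List.mem_cons_self),
      ih fun y hy => hP y (List.mem_cons_of_mem _ hy)]
    rfl

-- the ptr-advancing while loop stops at the end of the c-block
lemma pv_whileA_spec (P S : List Char) (c : Char) (cnt : Nat) (hS : ∀ x ∈ S, c < x) :
    ∀ d p, P.length ≤ p → p ≤ P.length + cnt → P.length + cnt - p = d →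
      pvWhileA (P ++ (List.replicate cnt c ++ S)) c (P.length + cnt + S.length) p =
        P.length + cnt := by
  intro d
  induction d with
  | zero =>
    intro p h1 h2 h3
    have hp : p = P.length + cnt := by omega
    subst hp
    rw [pvWhileA, if_neg]
    rintro ⟨hlt, hget⟩
    rw [PySem.List.pyGet?_natCast, pv_get3, if_neg (by omega), if_neg (by omega)] at hget
    have hS0 : P.length + cnt - P.length - cnt < S.length := by omega
    rw [List.getElem?_eq_getElem (by omega)] at hget
    have : c < S[P.length + cnt - P.length - cnt] := hS _ (List.getElem_mem _)
    rw [Option.some_inj] at hget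
    rw [hget] at this
    exact lt_irrefl _ this
  | succ d ih =>
    intro p h1 h2 h3
    rw [pvWhileA, if_pos]
    · exact ih (p + 1) (by omega) (by omega) (by omega)
    · constructor
      · omega
      · rw [PySem.List.pyGet?_natCast, pv_get3, if_neg (by omega), if_pos (by omega)]

lemma pvSwapA_eq (sb : List Char) (i p : Nat) (a b : Char)
    (ha : sb[i]? = some a) (hb : sb[p]? = some b) :
    pvSwapA sb i p = (sb.set i b).set p a := by
  unfold pvSwapA
  rw [ha, hb]

-- one swap of the loop advances the five-segment state
lemma pv_swap_step (P S : List Char) (c : Char) (r q j : Nat)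
    (hq : 1 ≤ q) (hj : j < S.length) :
    pvSwapA (P ++ (List.replicate r c ++ (S.take j ++ (List.replicate q c ++ S.drop j))))
      (P.length + r + j) (P.length + r + j + q)
      = P ++ (List.replicate r c ++ (S.take (j + 1) ++ (List.replicate q c ++ S.drop (j + 1)))) := by
  have hVi : (P ++ (List.replicate r c ++ (S.take j ++ (List.replicate q c ++ S.drop j))))[P.length + r + j]? = some c := by
    rw [pv_getV _ _ _ _ _ _ _ (le_of_lt hj), if_neg (by omega), if_neg (by omega),
      if_neg (by omega), if_pos (by omega)]
  have hVp : (P ++ (List.replicate r c ++ (S.take j ++ (List.replicate q c ++ S.drop j))))[P.length + r + j + q]? = some S[j] := by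
    rw [pv_getV _ _ _ _ _ _ _ (le_of_lt hj), if_neg (by omega), if_neg (by omega),
      if_neg (by omega), if_neg (by omega),
      show P.length + r + j + q - P.length - r - q = j by omega,
      List.getElem?_eq_getElem hj]
  obtain ⟨q', rfl⟩ : ∃ q', q = q' + 1 := ⟨q - 1, by omega⟩
  rw [pvSwapA_eq _ _ _ _ _ hVi hVp]
  have hVlen : (P ++ (List.replicate r c ++ (S.take j ++ (List.replicate (q' + 1) c ++ S.drop j)))).length
      = P.length + r + (q' + 1) + S.length := by
    simp [min_eq_left hj.le]
    omega
  apply List.ext_getElem?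
  intro n
  rw [List.getElem?_set, List.getElem?_set, List.length_set, hVlen]
  rw [pv_getV _ _ _ _ _ _ _ hj.le, pv_getV _ _ _ _ _ _ _ (by omega : j + 1 ≤ S.length)]
  split_ifs <;> first
    | rfl
    | omega
    | (exact congrArg (fun k => S[k]?) (by omega))
    | (rw [(by omega : n - P.length - r = j), List.getElem?_eq_getElem hj])

-- the swap loop computes the closed form
lemma pv_forA_inv (P S : List Char) (c : Char) (r q : Nat)
    (hP : ∀ x ∈ P, x < c) (hr : 1 ≤ r) (hq : 1 ≤ q)
    (hn1 : q + S.length ≤ P.length + r + 1)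
    (hn2 : P.length + r ≤ q + S.length) :
    ∀ d j, j ≤ S.length → j ≤ q + S.length - P.length → q + S.length - P.length - j = d →
      pvForA (P ++ (List.replicate r c ++ (S.take j ++ (List.replicate q c ++ S.drop j))))
        (P.length + r + q + S.length) (P.length + r + j) (P.length + r + q + j)
      = if q ≤ P.length
        then String.ofList (P ++ (List.replicate r c ++
              (S.take (q + S.length - P.length) ++
               (List.replicate q c ++ S.drop (q + S.length - P.length)))))
        else "-1" := by
  intro d
  induction d with
  | zero =>
    intro j hj1 hj2 hd
    have hjk : j = q + S.length - P.length := by omega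
    have hql : q ≤ P.length := by omega
    have hlo : 1 ≤ P.length := by omega
    have hVi : PySem.List.pyGet?
        (P ++ (List.replicate r c ++ (S.take j ++ (List.replicate q c ++ S.drop j))))
        ((P.length + r + j : Nat) : Int) = some c := by
      rw [PySem.List.pyGet?_natCast, pv_getV _ _ _ _ _ _ _ hj1, if_neg (by omega),
        if_neg (by omega), if_neg (by omega), if_pos (by omega)]
    have hVlen : (P ++ (List.replicate r c ++ (S.take j ++ (List.replicate q c ++ S.drop j)))).length
        = P.length + r + q + S.length := by
      simp [min_eq_left hj1]; omega
    have hmir : PySem.List.pyGet?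
        (P ++ (List.replicate r c ++ (S.take j ++ (List.replicate q c ++ S.drop j))))
        (Int.negSucc (P.length + r + j)) = some (P[P.length - 1]'(by omega)) := by
      rw [show Int.negSucc (P.length + r + j) = -((P.length + r + j + 1 : Nat) : Int) by
        rw [Int.negSucc_eq]; push_cast; ring]
      rw [PySem.List.pyGet?_neg_natCast _ _ (by omega) (by omega)]
      rw [hVlen, show P.length + r + q + S.length - (P.length + r + j + 1) = P.length - 1 by omega]
      rw [pv_getV _ _ _ _ _ _ _ hj1, if_pos (by omega), List.getElem?_eq_getElem (by omega)]
    rw [pvForA, dif_pos (by omega), hVi, hmir, if_pos]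
    · rw [if_pos hql, hjk]
    · have : (P[P.length - 1]'(by omega)) < c := hP _ (List.getElem_mem _)
      simp [this.ne']
  | succ d ih =>
    intro j hj1 hj2 hd
    have hjk : j < q + S.length - P.length := by omega
    have hVi : PySem.List.pyGet?
        (P ++ (List.replicate r c ++ (S.take j ++ (List.replicate q c ++ S.drop j))))
        ((P.length + r + j : Nat) : Int) = some c := by
      rw [PySem.List.pyGet?_natCast, pv_getV _ _ _ _ _ _ _ hj1, if_neg (by omega),
        if_neg (by omega), if_neg (by omega), if_pos (by omega)]
    have hVlen : (P ++ (List.replicate r c ++ (S.take j ++ (List.replicate q c ++ S.drop j)))).length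
        = P.length + r + q + S.length := by
      simp [min_eq_left hj1]; omega
    have hmir : PySem.List.pyGet?
        (P ++ (List.replicate r c ++ (S.take j ++ (List.replicate q c ++ S.drop j))))
        (Int.negSucc (P.length + r + j)) = some c := by
      rw [show Int.negSucc (P.length + r + j) = -((P.length + r + j + 1 : Nat) : Int) by
        rw [Int.negSucc_eq]; push_cast; ring]
      rw [PySem.List.pyGet?_neg_natCast _ _ (by omega) (by omega)]
      rw [hVlen, show P.length + r + q + S.length - (P.length + r + j + 1)
            = q + S.length - j - 1 by omega]
      rw [pv_getV _ _ _ _ _ _ _ hj1]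
      split_ifs with h1 h2 h3 h4
      · omega
      · rfl
      · omega
      · rfl
      · omega
    rw [pvForA, dif_pos (by omega), hVi, hmir, if_neg (by simp)]
    by_cases hjs : j = S.length
    · rw [if_pos (by omega), if_neg (by omega)]
    · have hjs' : j < S.length := by omega
      rw [if_neg (by omega)]
      rw [show P.length + r + q + j = P.length + r + j + q by omega,
        pv_swap_step P S c r q j hq hjs']
      convert ih (j + 1) (by omega) (by omega) (by omega) using 2
      all_goals omega

-- the whole equal-middle branch: while loop + swap loop = closed form
lemma pv_branch (P S : List Char) (c : Char) (cnt m : Nat)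
    (hP : ∀ x ∈ P, x < c) (hS : ∀ x ∈ S, c < x)
    (h1 : P.length < m) (h2 : m < P.length + cnt)
    (hm : m = (P.length + cnt + S.length) / 2) :
    pvForA (P ++ (List.replicate cnt c ++ S)) (P.length + cnt + S.length) m
        (pvWhileA (P ++ (List.replicate cnt c ++ S)) c (P.length + cnt + S.length) m)
    = (if cnt > m then "-1"
       else String.ofList
         ((P ++ (List.replicate cnt c ++ S)).take m ++
          ((P ++ (List.replicate cnt c ++ S)).drop (P.length + cnt)).take
            (P.length + cnt + S.length - P.length - m) ++
          List.replicate (P.length + cnt - m) c ++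
          (P ++ (List.replicate cnt c ++ S)).drop
            (P.length + cnt + (P.length + cnt + S.length - P.length - m)))) := by
  rw [pv_whileA_spec P S c cnt hS (P.length + cnt - m) m (by omega) (by omega) rfl]
  have key := pv_forA_inv P S c (m - P.length) (P.length + cnt - m) hP (by omega) (by omega)
    (by omega) (by omega) (P.length + cnt - m + S.length - P.length) 0 (by omega) (by omega) (by omega)
  simp only [List.take_zero, List.drop_zero, List.nil_append, Nat.add_zero] at key
  have E1 : (P ++ (List.replicate cnt c ++ S)).take m = P ++ List.replicate (m - P.length) c := by
    rw [List.take_append, List.take_of_length_le (by omega), List.take_append,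
      List.take_replicate, List.length_replicate,
      show min (m - P.length) cnt = m - P.length by omega,
      show m - P.length - cnt = 0 by omega, List.take_zero, List.append_nil]
  have E2 : (P ++ (List.replicate cnt c ++ S)).drop (P.length + cnt) = S := by
    rw [List.drop_append, List.drop_of_length_le (by omega),
      show P.length + cnt - P.length = cnt by omega, List.drop_append,
      List.drop_replicate, List.length_replicate, Nat.sub_self]
    simp
  have E3 : (P ++ (List.replicate cnt c ++ S)).drop
      (P.length + cnt + (P.length + cnt + S.length - P.length - m))
      = S.drop (P.length + cnt - m + S.length - P.length) := by
    rw [List.drop_append, List.drop_of_length_le (by omega), List.drop_append,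
      List.drop_replicate, List.length_replicate,
      show P.length + cnt + (P.length + cnt + S.length - P.length - m) - P.length - cnt
        = P.length + cnt - m + S.length - P.length by omega,
      show P.length + cnt + (P.length + cnt + S.length - P.length - m) - P.length
        = cnt + (P.length + cnt - m + S.length - P.length) by omega,
      show cnt - (cnt + (P.length + cnt - m + S.length - P.length)) = 0 by omega]
    simp
  have e : P.length + (m - P.length) = m := by omega
  rw [e] at key
  have e2 : m + (P.length + cnt - m) = P.length + cnt := by omega
  rw [e2] at key
  have eL : P ++ (List.replicate cnt c ++ S)
      = P ++ (List.replicate (m - P.length) c ++ (List.replicate (P.length + cnt - m) c ++ S)) := by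
    have h : List.replicate (m - P.length) c ++ List.replicate (P.length + cnt - m) c
        = List.replicate cnt c := by
      rw [← List.replicate_add]
      congr 1
      omega
    rw [← h, List.append_assoc]
  rw [← eL] at key
  rw [key]
  by_cases hql : P.length + cnt - m ≤ P.length
  · rw [if_pos hql, if_neg (by omega)]
    rw [E1, E2, E3, show P.length + cnt + S.length - P.length - m
        = P.length + cnt - m + S.length - P.length by omega]
    congr 1
    simp [List.append_assoc]
  · rw [if_neg hql, if_pos (by omega)]

-- ports agree on every nonempty string
lemma pv_main (s : String) (hpre : s ≠ "") : makeAntiPalindrome s = makeAntiPalindrome_alt s := by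
  have hl : s.toList ≠ [] := fun h => hpre (String.toList_eq_nil_iff.1 h)
  unfold makeAntiPalindrome makeAntiPalindrome_alt
  simp only [PySem.Dict.foldl_insert_getD_add_one_eq_counter, PySem.Dict.getD_counter,
    PySem.Dict.keys_counter, Int.toNat_natCast, Nat.shiftRight_one, pv_t_eq_sorted]
  set l := s.toList with hldef
  have hsblen : (PySem.List.sorted l (fun c : Char => c) false).length = l.length :=
    PySem.List.length_sorted _ _ _
  by_cases hone : l.length = 1
  · obtain ⟨x, hx⟩ := List.length_eq_one_iff.1 hone
    rw [hx]
    have hsx : PySem.List.sorted [x] (fun c : Char => c) false = [x] :=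
      PySem.List.sorted_eq_self_of_pairwise _ _ (List.pairwise_singleton _ _)
    rw [hsx]
    have h0 : ([x] : List Char).length / 2 = 0 := by simp
    rw [h0, show ((0 : Nat) : Int) - 1 = (-1 : Int) by norm_num,
      PySem.List.pyGet?_natCast, PySem.List.pyGet?_neg_one]
    simp only [List.getElem?_cons_zero, List.getLast?_singleton]
    rw [if_neg (by simp), if_neg (by simp)]
    have hw : pvWhileA [x] x 1 0 = 1 := by
      rw [pvWhileA, if_pos ⟨by norm_num, by rw [PySem.List.pyGet?_natCast]; simp⟩,
        pvWhileA, if_neg (by norm_num)]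
    rw [show ([x] : List Char).length = 1 from rfl]
    rw [hw, pvForA, dif_pos (by norm_num),
      show Int.negSucc 0 = (-1 : Int) from rfl, PySem.List.pyGet?_neg_one]
    rw [PySem.List.pyGet?_natCast]
    simp only [List.getElem?_cons_zero, List.getLast?_singleton]
    rw [if_neg (by simp), if_pos (by norm_num)]
    simp
  · have hn2 : 2 ≤ l.length := by
      have := List.length_pos_iff.2 hl
      omega
    set m := l.length / 2 with hmdef
    have hm1 : 1 ≤ m := by omega
    have hmlt : m < l.length := by omega
    have hPm : m < (PySem.List.sorted l (fun c : Char => c) false).length := by omega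
    have hPm1 : m - 1 < (PySem.List.sorted l (fun c : Char => c) false).length := by omega
    rw [show ((m : Nat) : Int) - 1 = ((m - 1 : Nat) : Int) by omega]
    rw [PySem.List.pyGet?_natCast, PySem.List.pyGet?_natCast,
      List.getElem?_eq_getElem hPm, List.getElem?_eq_getElem hPm1]
    simp only []
    by_cases hab : (PySem.List.sorted l (fun c : Char => c) false)[m]'hPm
        = (PySem.List.sorted l (fun c : Char => c) false)[m - 1]'hPm1
    · rw [if_neg (by simpa using hab), if_neg (by simp [hab])]
      set c := (PySem.List.sorted l (fun c : Char => c) false)[m - 1]'hPm1 with hcdef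
      have hcmem : c ∈ l := by
        rw [← PySem.List.mem_sorted l (fun c : Char => c) false]
        exact List.getElem_mem _
      have hcnt1 : 1 ≤ List.count c l := List.count_pos_iff.2 hcmem
      have hdec := pv_decomp l c
      set P := (PySem.List.sorted l (fun x : Char => x) false).filter (fun x => decide (x < c))
        with hPdef
      set S := (PySem.List.sorted l (fun x : Char => x) false).filter (fun x => decide (c < x))
        with hSdef
      set cnt := List.count c l with hcntdef
      have hP : ∀ x ∈ P, x < c := by
        intro x hx
        rw [hPdef] at hx
        exact of_decide_eq_true (List.mem_filter.1 hx).2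
      have hS : ∀ x ∈ S, c < x := by
        intro x hx
        rw [hSdef] at hx
        exact of_decide_eq_true (List.mem_filter.1 hx).2
      have hlsum : l.length = P.length + cnt + S.length := by
        have h := congrArg List.length hdec
        rw [hsblen] at h
        simp only [List.length_append, List.length_replicate] at h
        omega
      have hm2 : m < P.length + cnt := by
        by_contra hcon
        have hg := pv_get3 P S c cnt m
        rw [← hdec, List.getElem?_eq_getElem hPm, if_neg (by omega), if_neg (by omega)] at hg
        have hmemS := List.mem_of_getElem? hg.symm
        have := hS _ hmemS
        rw [hab] at this
        exact lt_irrefl _ this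
      have hlo : P.length < m := by
        by_contra hcon
        have hg := pv_get3 P S c cnt (m - 1)
        rw [← hdec, List.getElem?_eq_getElem hPm1, if_pos (by omega)] at hg
        have hmemP := List.mem_of_getElem? hg.symm
        exact lt_irrefl _ (hP _ hmemP)
      have hbr := pv_branch P S c cnt m hP hS hlo hm2 (by omega)
      rw [hdec, hlsum]
      rw [pv_index3 P S c cnt (fun x hx => (hP x hx).ne) hcnt1]
      simp only []
      rw [PySem.List.slice_to_natCast, PySem.List.slice_from_natCast]
      rw [show ((P.length + cnt + (P.length + cnt + S.length - P.length - m) : Nat) : Int)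
          = ((P.length + cnt : Nat) : Int) + ((P.length + cnt + S.length - P.length - m : Nat) : Int)
          by push_cast; ring]
      rw [PySem.List.slice_natCast_add]
      rw [hbr]
    · rw [if_pos (by simpa using hab), if_pos (by simp; exact fun h => hab h)]

-- ===== VERDICT (by name: the statement is the Claim_ definition above) =====
theorem makeAntiPalindrome_spec : Claim_equal_makeAntiPalindrome := by
  intro s _ hpre
  unfold Spec_makeAntiPalindrome
  exact pv_main s hpre
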